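-- pv_equiv track=rewrite | github.com/mbrg/link-archive | src/processors/weblog_processor.py | extract_paragraph_for_line
-- ===== SOURCE A (Python) =====
-- def extract_paragraph_for_line(content_lines, line_number):
--     """Extract the full paragraph containing the specified line, expanding until empty lines."""
--     if line_number <= 0 or line_number > len(content_lines):
--         return ""
--
--     target_line = content_lines[line_number - 1].strip()
--     if not target_line:
--         return ""
--
--     # Start with the target line
--     start = line_number - 1
--     end = line_number - 1
--
--     # Go backward until we hit an empty line or beginning of file
--     while start > 0:
--         prev_line = content_lines[start - 1].strip()
--         if not prev_line:  # Empty line - stop here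
--             break
--         start -= 1
--
--     # Go forward until we hit an empty line or end of file
--     while end < len(content_lines) - 1:
--         next_line = content_lines[end + 1].strip()
--         if not next_line:  # Empty line - stop here
--             break
--         end += 1
--
--     # Extract the full paragraph including all non-empty lines in range
--     paragraph_lines = []
--     for i in range(start, end + 1):
--         line = content_lines[i].strip()
--         if line:  # Only include non-empty lines
--             paragraph_lines.append(line)
--
--     return ' '.join(paragraph_lines)
-- ===== SOURCE B (Python) =====
-- def extract_paragraph_for_line(content_lines, line_number):
--     """Extract the full paragraph containing the specified line by segmenting the
--     whole file into paragraphs (maximal runs of non-blank lines) and locating the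
--     one whose index range contains the target line."""
--     n = len(content_lines)
--     if line_number <= 0 or line_number > n:
--         return ""
--     stripped = [line.strip() for line in content_lines]
--     target = line_number - 1
--     if not stripped[target]:
--         return ""
--     # One pass: segment into paragraphs as (start_index, end_index) pairs.
--     paragraphs = []
--     current_start = None
--     for i, line in enumerate(stripped):
--         if line:
--             if current_start is None:
--                 current_start = i
--         elif current_start is not None:
--             paragraphs.append((current_start, i - 1))
--             current_start = None
--     if current_start is not None:
--         paragraphs.append((current_start, n - 1))
--     # Locate the paragraph containing the target line.
--     for start, end in paragraphs:
--         if start <= target <= end: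
--             return ' '.join(stripped[start:end + 1])
--     return ""
-- ===== Notes on version B (the rewrite author's own statement) =====
-- stated objective: faster
-- what changed: B segments the whole file into paragraphs (maximal runs of non-blank stripped lines) in one pass over lines stripped exactly once, then locates the paragraph whose index range contains the target line, instead of A's bidirectional expansion that strips boundary lines in two scans and then re-strips every paragraph line in a third collection pass.
import Mathlib
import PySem

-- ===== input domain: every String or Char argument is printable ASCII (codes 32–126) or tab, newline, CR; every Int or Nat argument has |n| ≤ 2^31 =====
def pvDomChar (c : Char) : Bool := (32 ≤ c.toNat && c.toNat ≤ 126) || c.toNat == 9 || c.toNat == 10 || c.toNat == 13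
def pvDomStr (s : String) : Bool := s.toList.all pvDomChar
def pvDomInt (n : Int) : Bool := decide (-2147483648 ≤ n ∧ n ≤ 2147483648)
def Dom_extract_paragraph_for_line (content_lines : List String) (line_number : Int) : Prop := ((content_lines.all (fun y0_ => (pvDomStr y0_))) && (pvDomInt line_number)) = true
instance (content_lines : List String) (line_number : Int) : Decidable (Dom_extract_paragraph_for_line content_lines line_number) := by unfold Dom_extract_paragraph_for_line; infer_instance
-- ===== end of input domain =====

-- B changes the decomposition: one segmentation pass (each line stripped once) plus a paragraph
-- lookup, instead of A's bidirectional expansion with a re-stripping collection pass; the timing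
-- run measured B faster by a constant factor, and equivalence is proved below.

-- ===== PORT A =====
-- A's backward while loop: 'while start > 0: if not content_lines[start-1].strip(): break; start -= 1'
def pvGoBack (content_lines : List String) : Nat → Nat
  | 0 => 0
  | k + 1 => if PySem.Str.strip (content_lines.getD k "") = "" then k + 1 else pvGoBack content_lines k

-- A's forward while loop, with fuel = (len - 1) - end (the loop guard 'end < len - 1')
def pvGoFwd (content_lines : List String) : Nat → Nat → Nat
  | e, 0 => e
  | e, k + 1 => if PySem.Str.strip (content_lines.getD (e + 1) "") = "" then e else pvGoFwd content_lines (e + 1) k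

def extract_paragraph_for_line (content_lines : List String) (line_number : Int) : String :=
  if line_number ≤ 0 ∨ line_number > PySem.List.len content_lines then ""
  else
    -- guard ensures 1 ≤ line_number ≤ len, so the Nat index line_number - 1 is exact
    let t : Nat := (line_number - 1).toNat
    let target_line := PySem.Str.strip (content_lines.getD t "")
    if target_line = "" then ""
    else
      let start := pvGoBack content_lines t
      let e := pvGoFwd content_lines t (content_lines.length - 1 - t)
      -- 'for i in range(start, end + 1)': Nat indices, all in range
      let paragraph_lines := (List.range' start (e + 1 - start)).foldl
        (fun acc i =>
          let line := PySem.Str.strip (content_lines.getD i "")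
          if line ≠ "" then acc ++ [line] else acc) []
      PySem.Str.join " " paragraph_lines

-- ===== PORT B =====
-- B's segmentation loop 'for i, line in enumerate(stripped)' with state (paragraphs, current_start),
-- including the final flush (at the end i = n, so the flushed end index n - 1 is i - 1)
def pvSeg : List String → Nat → List (Nat × Nat) → Option Nat → List (Nat × Nat)
  | [], i, ps, cur =>
    (match cur with
     | none => ps
     | some a => ps ++ [(a, i - 1)])
  | line :: rest, i, ps, cur =>
    if line ≠ "" then
      pvSeg rest (i + 1) ps (match cur with | none => some i | some a => some a)
    else
      match cur with
      | none => pvSeg rest (i + 1) ps none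
      | some a => pvSeg rest (i + 1) (ps ++ [(a, i - 1)]) none

def extract_paragraph_for_line_alt (content_lines : List String) (line_number : Int) : String :=
  let n := PySem.List.len content_lines
  if line_number ≤ 0 ∨ line_number > n then ""
  else
    let stripped := content_lines.map PySem.Str.strip
    let target : Nat := (line_number - 1).toNat
    if stripped.getD target "" = "" then ""
    else
      let paragraphs := pvSeg stripped 0 [] none
      -- 'for start, end in paragraphs: if start <= target <= end: return …'
      match paragraphs.find? (fun p => decide (p.1 ≤ target ∧ target ≤ p.2)) with
      | some (s, e) =>
        PySem.Str.join " " (PySem.List.slice stripped (some (s : Int)) (some ((e + 1 : Nat) : Int)))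
      | none => ""

-- ===== PRECONDITION & SPEC =====
def Spec_extract_paragraph_for_line (content_lines : List String) (line_number : Int) (out : String) : Prop := out = extract_paragraph_for_line_alt content_lines line_number
instance (content_lines : List String) (line_number : Int) (out : String) : Decidable (Spec_extract_paragraph_for_line content_lines line_number out) := by unfold Spec_extract_paragraph_for_line; infer_instance

-- ===== CLAIM (what is proved, stated in full; the proofs are below) =====
def Claim_equal_extract_paragraph_for_line : Prop := ∀ (content_lines : List String) (line_number : Int), Dom_extract_paragraph_for_line content_lines line_number → Spec_extract_paragraph_for_line content_lines line_number (extract_paragraph_for_line content_lines line_number)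

-- ===== LEMMAS AND PROOFS =====

-- getD commutes with mapping strip (strip "" = "" covers the out-of-range default)
theorem pvStripGetD (l : List String) (i : Nat) :
    (l.map PySem.Str.strip).getD i "" = PySem.Str.strip (l.getD i "") := by
  simp only [List.getD_eq_getElem?_getD, List.getElem?_map]
  cases l[i]? with
  | none => decide
  | some v => simp [Option.map]

-- a maximal run of non-blank stripped lines, as index range [a, b]
def pvRun (s : List String) (a b : Nat) : Prop :=
  a ≤ b ∧ b < s.length ∧ (∀ j, a ≤ j → j ≤ b → s.getD j "" ≠ "") ∧
    (a = 0 ∨ s.getD (a - 1) "" = "") ∧ (b + 1 = s.length ∨ s.getD (b + 1) "" = "")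

theorem pvGoBack_le (cl : List String) : ∀ t, pvGoBack cl t ≤ t := by
  intro t
  induction t with
  | zero => simp [pvGoBack]
  | succ k ih => simp only [pvGoBack]; split <;> omega

theorem pvGoBack_spec (cl : List String) :
    ∀ t, (∀ j, pvGoBack cl t ≤ j → j < t → PySem.Str.strip (cl.getD j "") ≠ "") ∧
      (pvGoBack cl t = 0 ∨ PySem.Str.strip (cl.getD (pvGoBack cl t - 1) "") = "") := by
  intro t
  induction t with
  | zero => exact ⟨fun j _ h => absurd h (by omega), Or.inl rfl⟩
  | succ k ih =>
    simp only [pvGoBack]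
    by_cases h : PySem.Str.strip (cl.getD k "") = ""
    · rw [if_pos h]
      exact ⟨fun j h1 h2 => by omega, Or.inr (by simpa using h)⟩
    · rw [if_neg h]
      obtain ⟨ih1, ih2⟩ := ih
      refine ⟨fun j h1 h2 => ?_, ih2⟩
      rcases Nat.lt_or_ge j k with hk | hk
      · exact ih1 j h1 hk
      · have hjk : j = k := by omega
        rw [hjk]; exact h

theorem pvGoFwd_spec (cl : List String) :
    ∀ fuel e, fuel + e + 1 = cl.length →
      e ≤ pvGoFwd cl e fuel ∧ pvGoFwd cl e fuel < cl.length ∧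
      (∀ j, e < j → j ≤ pvGoFwd cl e fuel → PySem.Str.strip (cl.getD j "") ≠ "") ∧
      (pvGoFwd cl e fuel + 1 = cl.length ∨ PySem.Str.strip (cl.getD (pvGoFwd cl e fuel + 1) "") = "") := by
  intro fuel
  induction fuel with
  | zero =>
    intro e he
    simp only [pvGoFwd]
    exact ⟨le_refl _, by omega, fun j h1 h2 => absurd h2 (by omega), Or.inl (by omega)⟩
  | succ k ih =>
    intro e he
    simp only [pvGoFwd]
    by_cases h : PySem.Str.strip (cl.getD (e + 1) "") = ""
    · rw [if_pos h]
      exact ⟨le_refl _, by omega, fun j h1 h2 => absurd h2 (by omega), Or.inr h⟩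
    · rw [if_neg h]
      obtain ⟨ih1, ih2, ih3, ih4⟩ := ih (e + 1) (by omega)
      refine ⟨by omega, ih2, fun j h1 h2 => ?_, ih4⟩
      rcases Nat.lt_or_ge (e + 1) j with hj | hj
      · exact ih3 j hj h2
      · have hje : j = e + 1 := by omega
        rw [hje]; exact h

-- A's expansion produces a maximal run containing t
theorem pvRun_of_expand (cl : List String) (t : Nat) (ht : t < cl.length)
    (hne : PySem.Str.strip (cl.getD t "") ≠ "") :
    pvRun (cl.map PySem.Str.strip) (pvGoBack cl t) (pvGoFwd cl t (cl.length - 1 - t)) := by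
  obtain ⟨hb1, hb2⟩ := pvGoBack_spec cl t
  obtain ⟨hf0, hf1, hf2, hf3⟩ := pvGoFwd_spec cl (cl.length - 1 - t) t (by omega)
  have hle := pvGoBack_le cl t
  refine ⟨by omega, by simpa using hf1, fun j hj1 hj2 => ?_, ?_, ?_⟩
  · rw [pvStripGetD]
    rcases Nat.lt_or_ge j t with hj | hj
    · exact hb1 j hj1 hj
    · rcases Nat.eq_or_lt_of_le hj with hj' | hj'
      · simpa [hj'.symm] using hne
      · exact hf2 j hj' hj2
  · rcases hb2 with h | h
    · exact Or.inl h
    · exact Or.inr (by rw [pvStripGetD]; exact h)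
  · rcases hf3 with h | h
    · exact Or.inl (by simpa using h)
    · exact Or.inr (by rw [pvStripGetD]; exact h)

-- two maximal runs containing the same index coincide
theorem pvRun_unique (s : List String) (t a1 b1 a2 b2 : Nat)
    (h1 : pvRun s a1 b1) (h2 : pvRun s a2 b2)
    (ha1 : a1 ≤ t) (hb1 : t ≤ b1) (ha2 : a2 ≤ t) (hb2 : t ≤ b2) :
    (a1, b1) = ((a2, b2) : Nat × Nat) := by
  obtain ⟨-, hlen1, hin1, hl1, hr1⟩ := h1
  obtain ⟨-, hlen2, hin2, hl2, hr2⟩ := h2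
  have ha : a1 = a2 := by
    rcases Nat.lt_trichotomy a1 a2 with h | h | h
    · rcases hl2 with h' | h'
      · omega
      · exact absurd h' (hin1 (a2 - 1) (by omega) (by omega))
    · exact h
    · rcases hl1 with h' | h'
      · omega
      · exact absurd h' (hin2 (a1 - 1) (by omega) (by omega))
  have hb : b1 = b2 := by
    rcases Nat.lt_trichotomy b1 b2 with h | h | h
    · rcases hr1 with h' | h'
      · omega
      · exact absurd h' (hin2 (b1 + 1) (by omega) (by omega))
    · exact h
    · rcases hr2 with h' | h'
      · omega
      · exact absurd h' (hin1 (b2 + 1) (by omega) (by omega))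
  rw [ha, hb]

theorem pvFind?_eq_of_unique {a : Type} (p : a → Bool) (l : List a) (x : a)
    (hx : x ∈ l) (hpx : p x = true) (huniq : ∀ y ∈ l, p y = true → y = x) :
    l.find? p = some x := by
  induction l with
  | nil => cases hx
  | cons h t ih =>
    by_cases hp : p h = true
    · rw [List.find?_cons_of_pos hp, huniq h (List.mem_cons_self) hp]
    · rw [List.find?_cons_of_neg hp]
      rcases List.mem_cons.mp hx with rfl | hx'
      · exact absurd hpx hp
      · exact ih hx' (fun y hy => huniq y (List.mem_cons_of_mem _ hy))

-- invariant carried by pvSeg's current_start accumulator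
def pvCurInv (s : List String) (i : Nat) : Option Nat → Prop
  | none => i = 0 ∨ s.getD (i - 1) "" = ""
  | some a => a < i ∧ (∀ j, a ≤ j → j < i → s.getD j "" ≠ "") ∧ (a = 0 ∨ s.getD (a - 1) "" = "")

theorem pvSeg_sound (s : List String) :
    ∀ (l : List String) (i : Nat) (ps : List (Nat × Nat)) (cur : Option Nat),
      i ≤ s.length → l = s.drop i → pvCurInv s i cur →
      (∀ x ∈ ps, pvRun s x.1 x.2) →
      ∀ x ∈ pvSeg l i ps cur, pvRun s x.1 x.2 := by
  intro l
  induction l with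
  | nil =>
    intro i ps cur hi hdrop hcur hps x hx
    have hlen : s.length ≤ i := List.drop_eq_nil_iff.mp hdrop.symm
    cases cur with
    | none => exact hps x (by simpa [pvSeg] using hx)
    | some a =>
      simp only [pvSeg] at hx
      rcases List.mem_append.mp hx with h | h
      · exact hps x h
      · have hx' : x = (a, i - 1) := by simpa using h
        obtain ⟨hai, hint, hbl⟩ := hcur
        subst hx'
        exact ⟨by omega, by omega, fun j hj1 hj2 => hint j hj1 (by omega), hbl,
          Or.inl (by omega)⟩
  | cons hd tl ih =>
    intro i ps cur hi hdrop hcur hps x hx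
    have hilt : i < s.length := by
      rcases Nat.lt_or_ge i s.length with h | h
      · exact h
      · rw [List.drop_eq_nil_iff.mpr h] at hdrop; cases hdrop
    have hcons : s.drop i = s[i] :: s.drop (i + 1) := List.drop_eq_getElem_cons hilt
    rw [hcons] at hdrop
    injection hdrop with hhd htl
    have hgd : s.getD i "" = hd := by
      rw [List.getD_eq_getElem?_getD, List.getElem?_eq_getElem hilt, hhd]; rfl
    simp only [pvSeg] at hx
    by_cases hne : hd ≠ ""
    · rw [if_pos hne] at hx
      cases cur with
      | none =>
        refine ih (i + 1) ps (some i) (by omega) htl ⟨by omega, fun j hj1 hj2 => ?_, hcur⟩ hps x hx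
        have : j = i := by omega
        rw [this, hgd]; exact hne
      | some a =>
        obtain ⟨hai, hint, hbl⟩ := hcur
        refine ih (i + 1) ps (some a) (by omega) htl ⟨by omega, fun j hj1 hj2 => ?_, hbl⟩ hps x hx
        rcases Nat.lt_or_ge j i with hj | hj
        · exact hint j hj1 hj
        · have : j = i := by omega
          rw [this, hgd]; exact hne
    · have hhe : hd = "" := by simpa using hne
      rw [if_neg hne] at hx
      cases cur with
      | none =>
        refine ih (i + 1) ps none (by omega) htl (Or.inr ?_) hps x hx
        simp only [Nat.add_sub_cancel]; rw [hgd]; exact hhe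
      | some a =>
        obtain ⟨hai, hint, hbl⟩ := hcur
        refine ih (i + 1) (ps ++ [(a, i - 1)]) none (by omega) htl (Or.inr (by simp only [Nat.add_sub_cancel]; rw [hgd]; exact hhe))
          (fun y hy => ?_) x hx
        rcases List.mem_append.mp hy with h | h
        · exact hps y h
        · have hy' : y = (a, i - 1) := by simpa using h
          subst hy'
          exact ⟨by omega, by omega, fun j hj1 hj2 => hint j hj1 (by omega), hbl,
            Or.inr (by have : i - 1 + 1 = i := by omega
                       rw [this, hgd]; exact hhe)⟩

theorem pvSeg_complete (s : List String) :
    ∀ (l : List String) (i : Nat) (ps : List (Nat × Nat)) (cur : Option Nat) (a b : Nat),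
      i ≤ s.length → l = s.drop i → pvCurInv s i cur → pvRun s a b →
      ((a, b) ∈ ps ∨ (cur = some a ∧ i ≤ b + 1) ∨ i ≤ a) →
      (a, b) ∈ pvSeg l i ps cur := by
  intro l
  induction l with
  | nil =>
    intro i ps cur a b hi hdrop hcur hrun hD
    have hlen : s.length ≤ i := List.drop_eq_nil_iff.mp hdrop.symm
    obtain ⟨hab, hblen, hint, hbl, hbr⟩ := hrun
    rcases hD with h | ⟨hc, hib⟩ | h
    · cases cur <;> simp only [pvSeg] <;> simp [h]
    · subst hc
      simp only [pvSeg]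
      have : b = i - 1 := by omega
      simp [this]
    · omega
  | cons hd tl ih =>
    intro i ps cur a b hi hdrop hcur hrun hD
    have hilt : i < s.length := by
      rcases Nat.lt_or_ge i s.length with h | h
      · exact h
      · rw [List.drop_eq_nil_iff.mpr h] at hdrop; cases hdrop
    have hcons : s.drop i = s[i] :: s.drop (i + 1) := List.drop_eq_getElem_cons hilt
    rw [hcons] at hdrop
    injection hdrop with hhd htl
    have hgd : s.getD i "" = hd := by
      rw [List.getD_eq_getElem?_getD, List.getElem?_eq_getElem hilt, hhd]; rfl
    obtain ⟨hab, hblen, hint, hbl, hbr⟩ := hrun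
    simp only [pvSeg]
    by_cases hne : hd ≠ ""
    · rw [if_pos hne]
      cases cur with
      | none =>
        have hcurInv' : pvCurInv s (i + 1) (some i) := by
          refine ⟨by omega, fun j hj1 hj2 => ?_, hcur⟩
          have : j = i := by omega
          rw [this, hgd]; exact hne
        refine ih (i + 1) ps (some i) a b (by omega) htl hcurInv'
          ⟨hab, hblen, hint, hbl, hbr⟩ ?_
        rcases hD with h | ⟨hc, _⟩ | h
        · exact Or.inl h
        · cases hc
        · rcases Nat.eq_or_lt_of_le h with h' | h'
          · refine Or.inr (Or.inl ⟨by rw [h'], by omega⟩)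
          · exact Or.inr (Or.inr h')
      | some c =>
        obtain ⟨hci, hcint, hcbl⟩ := hcur
        have hcurInv' : pvCurInv s (i + 1) (some c) := by
          refine ⟨by omega, fun j hj1 hj2 => ?_, hcbl⟩
          rcases Nat.lt_or_ge j i with hj | hj
          · exact hcint j hj1 hj
          · have : j = i := by omega
            rw [this, hgd]; exact hne
        refine ih (i + 1) ps (some c) a b (by omega) htl hcurInv'
          ⟨hab, hblen, hint, hbl, hbr⟩ ?_
        rcases hD with h | ⟨hc, hib⟩ | h
        · exact Or.inl h
        · injection hc with hc; subst hc
          refine Or.inr (Or.inl ⟨rfl, ?_⟩)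
          -- i ≤ b: if b + 1 = i then s[i-1+1] would be non-blank at the run border
          rcases Nat.lt_or_ge b i with hb | hb
          · have hbi : b + 1 = i := by omega
            rcases hbr with h' | h'
            · omega
            · rw [hbi, hgd] at h'; exact absurd h' hne
          · omega
        · rcases Nat.eq_or_lt_of_le h with h' | h'
          · -- a = i is impossible: a's left border is blank but cur's run reaches i - 1
            exfalso
            rcases hbl with h0 | h0
            · omega
            · exact hcint (a - 1) (by omega) (by omega) (by rwa [← h'] at h0 ⊢)
          · exact Or.inr (Or.inr h')
    · have hhe : hd = "" := by simpa using hne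
      rw [if_neg hne]
      have hia : i ≤ a → i + 1 ≤ a := by
        intro h
        rcases Nat.eq_or_lt_of_le h with h' | h'
        · exfalso; exact hint a (le_refl a) hab (by rw [h'] at hgd; rw [hgd]; exact hhe)
        · omega
      cases cur with
      | none =>
        refine ih (i + 1) ps none a b (by omega) htl (Or.inr (by simp only [Nat.add_sub_cancel]; rw [hgd]; exact hhe))
          ⟨hab, hblen, hint, hbl, hbr⟩ ?_
        rcases hD with h | ⟨hc, _⟩ | h
        · exact Or.inl h
        · cases hc
        · exact Or.inr (Or.inr (hia h))
      | some c =>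
        obtain ⟨hci, hcint, hcbl⟩ := hcur
        refine ih (i + 1) (ps ++ [(c, i - 1)]) none a b (by omega) htl
          (Or.inr (by simp only [Nat.add_sub_cancel]; rw [hgd]; exact hhe)) ⟨hab, hblen, hint, hbl, hbr⟩ ?_
        rcases hD with h | ⟨hc, hib⟩ | h
        · exact Or.inl (List.mem_append_left _ h)
        · injection hc with hc; subst hc
          have hbi : b = i - 1 := by
            rcases Nat.lt_or_ge b i with hb | hb
            · omega
            · exact absurd (by rw [hgd]; exact hhe) (hint i (by omega) (by omega))
          exact Or.inl (List.mem_append_right _ (by simp [hbi]))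
        · exact Or.inr (Or.inr (hia h))

theorem pvMap_getD_range' (s : List String) :
    ∀ (cnt a : Nat), a + cnt ≤ s.length →
      (List.range' a cnt).map (fun i => s.getD i "") = (s.drop a).take cnt := by
  intro cnt
  induction cnt with
  | zero => intro a _; simp
  | succ k ih =>
    intro a ha
    have hlt : a < s.length := by omega
    rw [List.range'_succ, List.drop_eq_getElem_cons hlt, List.map_cons, List.take_succ_cons,
      ih (a + 1) (by omega), List.getD_eq_getElem?_getD, List.getElem?_eq_getElem hlt]
    rfl

-- the two branch values agree: A's expanded-and-filtered paragraph text …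
theorem pvA_branch (cl : List String) (ln : Int)
    (hg : ¬(ln ≤ 0 ∨ ln > PySem.List.len cl))
    (he : ¬(PySem.Str.strip (cl.getD (ln - 1).toNat "") = "")) :
    extract_paragraph_for_line cl ln =
      PySem.Str.join " " (((cl.map PySem.Str.strip).drop (pvGoBack cl (ln - 1).toNat)).take
        (pvGoFwd cl (ln - 1).toNat (cl.length - 1 - (ln - 1).toNat) + 1 -
          pvGoBack cl (ln - 1).toNat)) := by
  have hlen : PySem.List.len cl = (cl.length : Int) := PySem.List.len_eq cl
  have ht : (ln - 1).toNat < cl.length := by omega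
  simp only [extract_paragraph_for_line, if_neg hg, if_neg he]
  set t := (ln - 1).toNat with htdef
  set st := pvGoBack cl t with hst
  set en := pvGoFwd cl t (cl.length - 1 - t) with hen
  obtain ⟨hrab, hrb, hrint, -, -⟩ := pvRun_of_expand cl t ht he
  rw [PySem.List.foldl_append_ite (p := fun i => PySem.Str.strip (cl.getD i "") ≠ "")
    (f := fun i => PySem.Str.strip (cl.getD i ""))]
  rw [List.nil_append]
  have hfil : (List.range' st (en + 1 - st)).filter
      (fun i => decide (PySem.Str.strip (cl.getD i "") ≠ "")) = List.range' st (en + 1 - st) := by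
    apply List.filter_eq_self.mpr
    intro i hi
    have hmem := List.mem_range'.mp hi
    have hb : st ≤ i ∧ i ≤ en := by omega
    have hne := hrint i hb.1 hb.2
    rw [pvStripGetD] at hne
    exact decide_eq_true hne
  rw [hfil]
  have hfun : (fun i => PySem.Str.strip (cl.getD i "")) =
      (fun i => (cl.map PySem.Str.strip).getD i "") := by
    funext i; exact (pvStripGetD cl i).symm
  rw [hfun, pvMap_getD_range' (cl.map PySem.Str.strip) (en + 1 - st) st
    (by rw [List.length_map] at *; omega)]

-- … equals B's located-paragraph slice
theorem pvB_branch (cl : List String) (ln : Int)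
    (hg : ¬(ln ≤ 0 ∨ ln > PySem.List.len cl))
    (he : ¬(PySem.Str.strip (cl.getD (ln - 1).toNat "") = "")) :
    extract_paragraph_for_line_alt cl ln =
      PySem.Str.join " " (((cl.map PySem.Str.strip).drop (pvGoBack cl (ln - 1).toNat)).take
        (pvGoFwd cl (ln - 1).toNat (cl.length - 1 - (ln - 1).toNat) + 1 -
          pvGoBack cl (ln - 1).toNat)) := by
  have hlen : PySem.List.len cl = (cl.length : Int) := PySem.List.len_eq cl
  have ht : (ln - 1).toNat < cl.length := by omega
  have he' : ¬((cl.map PySem.Str.strip).getD (ln - 1).toNat "" = "") := by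
    rw [pvStripGetD]; exact he
  simp only [extract_paragraph_for_line_alt, if_neg hg, if_neg he']
  set t := (ln - 1).toNat with htdef
  set s : List String := cl.map PySem.Str.strip with hsdef
  set st := pvGoBack cl t with hst
  set en := pvGoFwd cl t (cl.length - 1 - t) with hen
  have hsl : s.length = cl.length := by rw [hsdef, List.length_map]
  have hrun : pvRun s st en := pvRun_of_expand cl t ht he
  have hstt : st ≤ t := pvGoBack_le cl t
  have hten : t ≤ en := (pvGoFwd_spec cl (cl.length - 1 - t) t (by omega)).1
  have hfind : (pvSeg s 0 [] none).find? (fun p => decide (p.1 ≤ t ∧ t ≤ p.2)) =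
      some (st, en) := by
    apply pvFind?_eq_of_unique
    · exact pvSeg_complete s s 0 [] none st en (by omega) (by simp) (Or.inl rfl) hrun
        (Or.inr (Or.inr (Nat.zero_le _)))
    · exact decide_eq_true ⟨hstt, hten⟩
    · intro y hy hpy
      have hry := pvSeg_sound s s 0 [] none (by omega) (by simp) (Or.inl rfl)
        (by intro x hx; cases hx) y hy
      obtain ⟨hy1, hy2⟩ := of_decide_eq_true hpy
      have heq := pvRun_unique s t y.1 y.2 st en hry hrun hy1 hy2 hstt hten
      calc y = (y.1, y.2) := rfl
        _ = (st, en) := heq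
  simp only [hfind]
  rw [PySem.List.slice_natCast]

-- ===== VERDICT (by name: the statement is the Claim_ definition above) =====
theorem extract_paragraph_for_line_spec : Claim_equal_extract_paragraph_for_line := by
  intro cl ln _
  unfold Spec_extract_paragraph_for_line
  by_cases hg : ln ≤ 0 ∨ ln > PySem.List.len cl
  · simp only [extract_paragraph_for_line, extract_paragraph_for_line_alt, if_pos hg]
  · by_cases he : PySem.Str.strip (cl.getD (ln - 1).toNat "") = ""
    · have he' : (cl.map PySem.Str.strip).getD (ln - 1).toNat "" = "" := by
        rw [pvStripGetD]; exact he
      simp only [extract_paragraph_for_line, extract_paragraph_for_line_alt, if_neg hg,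
        if_pos he, if_pos he']
    · rw [pvA_branch cl ln hg he, pvB_branch cl ln hg he]
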